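-- pv_equiv track=rewrite | github.com/Safaet-Rabbi/Python | Codeforce/894A.py | count_QAQ_subsequences
-- ===== SOURCE A (Python) =====
-- def count_QAQ_subsequences(s):
--     n = len(s)
--     total_QAQ = 0
--     count_Q_before = [0] * n
--     count_Q_after = [0] * n
--     for i in range(1, n):
--         count_Q_before[i] = count_Q_before[i - 1] + (1 if s[i - 1] == 'Q' else 0)
--
--     for i in range(n - 2, -1, -1):
--         count_Q_after[i] = count_Q_after[i + 1] + (1 if s[i + 1] == 'Q' else 0)
--
--     for i in range(n):
--         if s[i] == 'A':
--             total_QAQ += count_Q_before[i] * count_Q_after[i]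
--
--     return total_QAQ
-- ===== SOURCE B (Python) =====
-- def count_QAQ_subsequences(s):
--     q = qa = qaq = 0
--     for c in s:
--         if c == 'Q':
--             qaq += qa
--             q += 1
--         elif c == 'A':
--             qa += q
--     return qaq
-- ===== Notes on version B (the rewrite author's own statement) =====
-- stated objective: simpler
-- what changed: Replaced the three-pass prefix/suffix count-array construction with a single left-to-right pass maintaining three running accumulators (Q count, QA subsequence count, QAQ subsequence count), using no auxiliary arrays.
import Mathlib
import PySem

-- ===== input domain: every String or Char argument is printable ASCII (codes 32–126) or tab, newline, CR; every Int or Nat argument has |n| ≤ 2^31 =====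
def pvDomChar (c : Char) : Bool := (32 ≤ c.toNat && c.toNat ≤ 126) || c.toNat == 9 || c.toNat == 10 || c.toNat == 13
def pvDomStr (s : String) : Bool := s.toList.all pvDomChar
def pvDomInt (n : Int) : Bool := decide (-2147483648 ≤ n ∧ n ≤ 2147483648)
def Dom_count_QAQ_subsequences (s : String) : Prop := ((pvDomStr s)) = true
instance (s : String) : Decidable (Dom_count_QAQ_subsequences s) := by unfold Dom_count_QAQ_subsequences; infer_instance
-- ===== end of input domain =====

-- B replaces A's three-pass prefix/suffix count-array construction by a single pass with three
-- running accumulators; simpler (no auxiliary arrays), same asymptotic cost.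


-- ===== PORT A =====
-- first loop: for i in range(1, n): count_Q_before[i] = count_Q_before[i-1] + (1 if s[i-1]=='Q' else 0)
def pvA_cb (l : List Char) : List Int :=
  (PySem.List.pyRange 1 (l.length : Int) 1).foldl
    (fun cb i =>
      PySem.List.pySetD cb i
        (PySem.List.pyGetD cb (i - 1) 0 + (if PySem.List.pyGetD l (i - 1) ' ' = 'Q' then 1 else 0)))
    (List.replicate l.length 0)

-- second loop: for i in range(n-2, -1, -1): count_Q_after[i] = count_Q_after[i+1] + (1 if s[i+1]=='Q' else 0)
def pvA_ca (l : List Char) : List Int :=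
  (PySem.List.pyRange ((l.length : Int) - 2) (-1) (-1)).foldl
    (fun ca i =>
      PySem.List.pySetD ca i
        (PySem.List.pyGetD ca (i + 1) 0 + (if PySem.List.pyGetD l (i + 1) ' ' = 'Q' then 1 else 0)))
    (List.replicate l.length 0)

def count_QAQ_subsequences (s : String) : Int :=
  let l := s.toList
  let count_Q_before := pvA_cb l
  let count_Q_after := pvA_ca l
  (PySem.List.pyRange 0 (l.length : Int) 1).foldl
    (fun total_QAQ i =>
      if PySem.List.pyGetD l i ' ' = 'A' then
        total_QAQ + PySem.List.pyGetD count_Q_before i 0 * PySem.List.pyGetD count_Q_after i 0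
      else total_QAQ)
    0

-- ===== PORT B =====
-- one pass, state (q, qa, qaq); on 'Q': qaq += qa then q += 1; on 'A': qa += q
def count_QAQ_subsequences_alt (s : String) : Int :=
  (s.toList.foldl
    (fun (st : Int × Int × Int) c =>
      if c = 'Q' then (st.1 + 1, st.2.1, st.2.2 + st.2.1)
      else if c = 'A' then (st.1, st.2.1 + st.1, st.2.2)
      else st)
    (0, 0, 0)).2.2

-- ===== PRECONDITION & SPEC =====
def Spec_count_QAQ_subsequences (s : String) (out : Int) : Prop := out = count_QAQ_subsequences_alt s
instance (s : String) (out : Int) : Decidable (Spec_count_QAQ_subsequences s out) := by unfold Spec_count_QAQ_subsequences; infer_instance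

-- ===== CLAIM (what is proved, stated in full; the proofs are below) =====
def Claim_equal_count_QAQ_subsequences : Prop := ∀ (s : String), Dom_count_QAQ_subsequences s → Spec_count_QAQ_subsequences s (count_QAQ_subsequences s)

-- ===== LEMMAS AND PROOFS =====

-- number of 'Q's in a list, as an Int
def pvQc : List Char → Int
  | [] => 0
  | c :: t => (if c = 'Q' then 1 else 0) + pvQc t

-- sum over 'A'-positions of (#Q before)·(#Q after): the common value of both programs
def pvAval (l : List Char) : Int :=
  ∑ i ∈ Finset.range l.length,
    if l.getD i ' ' = 'A' then pvQc (l.take i) * pvQc (l.drop (i + 1)) else 0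

-- sum over 'A'-positions of (#Q before): B's qa accumulator
def pvQa (l : List Char) : Int :=
  ∑ i ∈ Finset.range l.length, if l.getD i ' ' = 'A' then pvQc (l.take i) else 0

theorem pvQc_append (a b : List Char) : pvQc (a ++ b) = pvQc a + pvQc b := by
  induction a with
  | nil => simp [pvQc]
  | cons c t ih => simp only [List.cons_append, pvQc, ih]; ring

theorem pvQa_append (l : List Char) (c : Char) :
    pvQa (l ++ [c]) = pvQa l + (if c = 'A' then pvQc l else 0) := by
  unfold pvQa
  rw [List.length_append, List.length_singleton, Finset.sum_range_succ]
  congr 1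
  · apply Finset.sum_congr rfl
    intro i hi
    rw [Finset.mem_range] at hi
    rw [List.getD_append l [c] ' ' i hi, List.take_append_of_le_length (le_of_lt hi)]
  · simp

theorem pvAval_append (l : List Char) (c : Char) :
    pvAval (l ++ [c]) = pvAval l + (if c = 'Q' then pvQa l else 0) := by
  unfold pvAval
  rw [List.length_append, List.length_singleton, Finset.sum_range_succ]
  have hlast : (if (l ++ [c]).getD l.length ' ' = 'A' then
      pvQc ((l ++ [c]).take l.length) * pvQc ((l ++ [c]).drop (l.length + 1)) else 0) = 0 := by
    simp [pvQc]
  rw [hlast, add_zero]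
  have hstep : ∀ i ∈ Finset.range l.length,
      (if (l ++ [c]).getD i ' ' = 'A' then
        pvQc ((l ++ [c]).take i) * pvQc ((l ++ [c]).drop (i + 1)) else 0)
      = (if l.getD i ' ' = 'A' then pvQc (l.take i) * pvQc (l.drop (i + 1)) else 0)
        + (if c = 'Q' then (if l.getD i ' ' = 'A' then pvQc (l.take i) else 0) else 0) := by
    intro i hi
    rw [Finset.mem_range] at hi
    rw [List.getD_append l [c] ' ' i hi, List.take_append_of_le_length (le_of_lt hi),
        List.drop_append_of_le_length hi, pvQc_append]
    by_cases hQ : c = 'Q'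
    · rw [if_pos hQ, hQ]
      have h1 : pvQc ['Q'] = 1 := by decide
      rw [h1]
      split_ifs <;> ring
    · rw [if_neg hQ]
      have h0 : pvQc [c] = 0 := by simp [pvQc, hQ]
      rw [h0, add_zero, add_zero]
  rw [Finset.sum_congr rfl hstep, Finset.sum_add_distrib]
  by_cases hQ : c = 'Q' <;> simp [hQ, pvQa]

theorem pvB_fold (l : List Char) :
    l.foldl
      (fun (st : Int × Int × Int) c =>
        if c = 'Q' then (st.1 + 1, st.2.1, st.2.2 + st.2.1)
        else if c = 'A' then (st.1, st.2.1 + st.1, st.2.2)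
        else st)
      (0, 0, 0) = (pvQc l, pvQa l, pvAval l) := by
  induction l using List.reverseRecOn with
  | nil => simp [pvQc, pvQa, pvAval]
  | append_singleton t c ih =>
    rw [List.foldl_append, ih, List.foldl_cons, List.foldl_nil,
        pvQa_append, pvAval_append, pvQc_append]
    by_cases hQ : c = 'Q'
    · simp [hQ, pvQc]
    · by_cases hA : c = 'A' <;> simp [hQ, hA, pvQc]
theorem pv_set_map_range {n : Nat} (k : Nat) (f : Nat → Int) (v : Int) (_hk : k < n) :
    ((List.range n).map f).set k v = (List.range n).map (fun i => if i = k then v else f i) := by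
  apply List.ext_getElem
  · simp
  · intro i h1 h2
    simp only [List.getElem_set, List.getElem_map, List.getElem_range]
    by_cases h : i = k
    · simp [h]
    · rw [if_neg (by omega), if_neg h]

theorem pvQc_take_succ (l : List Char) (j : Nat) (h : j < l.length) :
    pvQc (l.take (j + 1)) = pvQc (l.take j) + (if l.getD j ' ' = 'Q' then 1 else 0) := by
  rw [List.take_add_one, List.getElem?_eq_getElem h, Option.toList_some, pvQc_append,
      List.getD_eq_getElem l ' ' h]
  simp [pvQc]

theorem pvQc_drop_succ (l : List Char) (j : Nat) (h : j < l.length) :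
    pvQc (l.drop j) = (if l.getD j ' ' = 'Q' then 1 else 0) + pvQc (l.drop (j + 1)) := by
  rw [List.drop_eq_getElem_cons h, List.getD_eq_getElem l ' ' h]
  simp [pvQc]

theorem pv_cb_loop (l : List Char) (k : Nat) (hk : k ≤ l.length) :
    (PySem.List.pyRange 1 (k : Int) 1).foldl
      (fun cb i =>
        PySem.List.pySetD cb i
          (PySem.List.pyGetD cb (i - 1) 0 + (if PySem.List.pyGetD l (i - 1) ' ' = 'Q' then 1 else 0)))
      (List.replicate l.length 0)
    = (List.range l.length).map (fun i => if i < k then pvQc (l.take i) else 0) := by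
  induction k with
  | zero =>
    rw [PySem.List.pyRange_one_eq_nil (by norm_num), List.foldl_nil]
    apply List.ext_getElem
    · simp
    · intro i h1 h2; simp
  | succ k ih =>
    rcases Nat.eq_zero_or_pos k with h0 | hpos
    · subst h0
      rw [show ((1:Nat):Int) = 1 from rfl, PySem.List.pyRange_one_eq_nil (le_refl 1), List.foldl_nil]
      apply List.ext_getElem
      · simp
      · intro i h1 h2
        simp only [List.getElem_replicate, List.getElem_map, List.getElem_range]
        by_cases hi : i = 0
        · subst hi; simp [pvQc]
        · rw [if_neg (by omega)]
    · have hcast : ((k + 1 : Nat) : Int) = (k : Int) + 1 := by push_cast; ring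
      rw [hcast, PySem.List.pyRange_one_succ_right (by exact_mod_cast hpos), List.foldl_append,
          ih (by omega), List.foldl_cons, List.foldl_nil]
      have h1 : (k : Int) - 1 = ((k - 1 : Nat) : Int) := by omega
      rw [h1, PySem.List.pyGetD_natCast, PySem.List.pyGetD_natCast, PySem.List.pySetD_natCast,
          PySem.List.getD_map_range _ _ _ _ (by omega : k - 1 < l.length),
          pv_set_map_range k _ _ (by omega)]
      apply List.map_congr_left
      intro i hi
      rw [List.mem_range] at hi
      by_cases hik : i = k
      · subst hik
        rw [if_pos rfl, if_pos (show i - 1 < i by omega), if_pos (show i < i + 1 by omega)]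
        have ht := pvQc_take_succ l (i - 1) (by omega)
        rw [Nat.sub_add_cancel hpos] at ht
        rw [ht]
      · rw [if_neg hik]
        by_cases h2 : i < k
        · rw [if_pos h2, if_pos (by omega)]
        · rw [if_neg h2, if_neg (by omega)]

-- one iteration of A's backward loop, on the characterized state
theorem pv_ca_step (l : List Char) (j : Nat) (hj : j < l.length) :
    PySem.List.pySetD ((List.range l.length).map (fun i => if j + 1 ≤ i then pvQc (l.drop (i + 1)) else 0)) (j : Int)
      (PySem.List.pyGetD ((List.range l.length).map (fun i => if j + 1 ≤ i then pvQc (l.drop (i + 1)) else 0)) ((j : Int) + 1) 0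
        + (if PySem.List.pyGetD l ((j : Int) + 1) ' ' = 'Q' then 1 else 0))
    = (List.range l.length).map (fun i => if j ≤ i then pvQc (l.drop (i + 1)) else 0) := by
  have hcast : (j : Int) + 1 = ((j + 1 : Nat) : Int) := by push_cast; ring
  rw [hcast, PySem.List.pyGetD_natCast, PySem.List.pyGetD_natCast, PySem.List.pySetD_natCast]
  have hval : ((List.range l.length).map (fun i => if j + 1 ≤ i then pvQc (l.drop (i + 1)) else 0)).getD (j + 1) 0
      + (if l.getD (j + 1) ' ' = 'Q' then 1 else 0) = pvQc (l.drop (j + 1)) := by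
    rcases Nat.lt_or_ge (j + 1) l.length with h | h
    · rw [PySem.List.getD_map_range _ _ _ _ h, if_pos (le_refl (j + 1)),
          pvQc_drop_succ l (j + 1) h]
      ring
    · rw [List.getD_eq_default _ _ (by simpa using h),
          List.getD_eq_default _ _ (by omega), if_neg (by decide)]
      have : l.drop (j + 1) = [] := List.drop_eq_nil_of_le h
      simp [this, pvQc]
  rw [hval, pv_set_map_range j _ _ hj]
  apply List.map_congr_left
  intro i hi
  by_cases hij : i = j
  · subst hij; rw [if_pos rfl, if_pos (le_refl i)]
  · rw [if_neg hij]
    by_cases h2 : j + 1 ≤ i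
    · rw [if_pos h2, if_pos (by omega)]
    · rw [if_neg h2, if_neg (by omega)]

theorem pv_ca_loop (l : List Char) (k : Nat) (hk : k < l.length) :
    (PySem.List.pyRange (k : Int) (-1) (-1)).foldl
      (fun ca i =>
        PySem.List.pySetD ca i
          (PySem.List.pyGetD ca (i + 1) 0 + (if PySem.List.pyGetD l (i + 1) ' ' = 'Q' then 1 else 0)))
      ((List.range l.length).map (fun i => if k + 1 ≤ i then pvQc (l.drop (i + 1)) else 0))
    = (List.range l.length).map (fun i => pvQc (l.drop (i + 1))) := by
  induction k with
  | zero =>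
    rw [PySem.List.pyRange_neg_one_cons (by norm_num), PySem.List.pyRange_neg_one_eq_nil (by norm_num),
        List.foldl_cons, List.foldl_nil]
    rw [show ((0:Nat):Int) = 0 from rfl] at *
    have := pv_ca_step l 0 hk
    simp only [Nat.cast_zero] at this
    rw [this]
    apply List.map_congr_left
    intro i hi
    rw [if_pos (Nat.zero_le i)]
  | succ k ih =>
    have hcast : ((k + 1 : Nat) : Int) = (k : Int) + 1 := by push_cast; ring
    rw [hcast, PySem.List.pyRange_neg_one_cons (by omega), List.foldl_cons,
        show (k : Int) + 1 - 1 = (k : Int) by ring]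
    have hstep := pv_ca_step l (k + 1) hk
    rw [hcast] at hstep
    rw [hstep]
    exact ih (by omega)

theorem pvA_cb_spec (l : List Char) :
    pvA_cb l = (List.range l.length).map (fun i => pvQc (l.take i)) := by
  rw [pvA_cb, pv_cb_loop l l.length (le_refl _)]
  apply List.map_congr_left
  intro i hi
  rw [List.mem_range] at hi
  rw [if_pos hi]

theorem pv_replicate_eq_g (l : List Char) (h : 2 ≤ l.length) :
    (List.replicate l.length (0 : Int))
    = (List.range l.length).map (fun i => if (l.length - 2) + 1 ≤ i then pvQc (l.drop (i + 1)) else 0) := by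
  apply List.ext_getElem
  · simp
  · intro i h1 h2
    simp only [List.length_replicate] at h1
    simp only [List.getElem_replicate, List.getElem_map, List.getElem_range]
    by_cases hc : l.length - 2 + 1 ≤ i
    · rw [if_pos hc, show i + 1 = l.length by omega, List.drop_length]
      simp [pvQc]
    · rw [if_neg hc]

theorem pvA_ca_spec (l : List Char) :
    pvA_ca l = (List.range l.length).map (fun i => pvQc (l.drop (i + 1))) := by
  rw [pvA_ca]
  rcases Nat.lt_or_ge l.length 2 with hn | hn
  · -- n = 0 or 1: the loop range is empty
    rw [PySem.List.pyRange_neg_one_eq_nil (by omega), List.foldl_nil]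
    apply List.ext_getElem
    · simp
    · intro i h1 h2
      simp only [List.getElem_replicate, List.getElem_map, List.getElem_range]
      have hi : i = 0 := by simp at h1; omega
      have hl : l.length = 1 := by simp at h1; omega
      subst hi
      rw [List.drop_eq_nil_of_le (by omega)]
      simp [pvQc]
  · have hcast : (l.length : Int) - 2 = ((l.length - 2 : Nat) : Int) := by omega
    rw [hcast, pv_replicate_eq_g l hn]
    exact pv_ca_loop l (l.length - 2) (by omega)

theorem pv_sum_loop (l : List Char) (k : Nat) (hk : k ≤ l.length) :
    (PySem.List.pyRange 0 (k : Int) 1).foldl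
      (fun total_QAQ i =>
        if PySem.List.pyGetD l i ' ' = 'A' then
          total_QAQ
            + PySem.List.pyGetD ((List.range l.length).map (fun i => pvQc (l.take i))) i 0
              * PySem.List.pyGetD ((List.range l.length).map (fun i => pvQc (l.drop (i + 1)))) i 0
        else total_QAQ)
      0
    = ∑ i ∈ Finset.range k,
        if l.getD i ' ' = 'A' then pvQc (l.take i) * pvQc (l.drop (i + 1)) else 0 := by
  induction k with
  | zero => rw [Nat.cast_zero, PySem.List.pyRange_one_eq_nil (le_refl 0), List.foldl_nil]; simp
  | succ k ih =>
    have hcast : ((k + 1 : Nat) : Int) = (k : Int) + 1 := by push_cast; ring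
    rw [hcast, PySem.List.pyRange_one_succ_right (by positivity), List.foldl_append,
        ih (by omega), List.foldl_cons, List.foldl_nil, Finset.sum_range_succ,
        PySem.List.pyGetD_natCast, PySem.List.pyGetD_natCast, PySem.List.pyGetD_natCast,
        PySem.List.getD_map_range _ _ _ _ (by omega : k < l.length),
        PySem.List.getD_map_range _ _ _ _ (by omega : k < l.length)]
    split_ifs <;> ring

theorem pvA_eq_aval (l : List Char) :
    (PySem.List.pyRange 0 (l.length : Int) 1).foldl
      (fun total_QAQ i =>
        if PySem.List.pyGetD l i ' ' = 'A' then
          total_QAQ + PySem.List.pyGetD (pvA_cb l) i 0 * PySem.List.pyGetD (pvA_ca l) i 0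
        else total_QAQ)
      0 = pvAval l := by
  simp only [pvA_cb_spec, pvA_ca_spec]
  exact pv_sum_loop l l.length (le_refl _)


-- ===== VERDICT (by name: the statement is the Claim_ definition above) =====
theorem count_QAQ_subsequences_spec : Claim_equal_count_QAQ_subsequences := by
  intro s _
  show count_QAQ_subsequences s = count_QAQ_subsequences_alt s
  rw [count_QAQ_subsequences, count_QAQ_subsequences_alt, pvB_fold, pvA_eq_aval]
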